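-- pv_equiv track=rewrite | github.com/gutsycoder/Important_DSA_Questions | Non-AttackingQueen.py | getNumberOfNonAttackingQueenPlacements
-- ===== SOURCE A (Python) =====
-- def getNumberOfNonAttackingQueenPlacements(row,blockedColumns,blockedLeftDiagonals,blockedRightDiagonals,boardSize):
--     if row==boardSize:
--         return 1
--
--     validPlacements=0
--     for col in range(boardSize):
--         if isNonAttackingPlacements(row,col,blockedColumns,blockedLeftDiagonals,blockedRightDiagonals):
--             placeQueen(row,col,blockedColumns,blockedLeftDiagonals,blockedRightDiagonals)
--             validPlacements+=getNumberOfNonAttackingQueenPlacements(row+1,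
--                                                                    blockedColumns,blockedLeftDiagonals,blockedRightDiagonals,boardSize)
--             removeQueen(row,col,blockedColumns,blockedLeftDiagonals,blockedRightDiagonals)
--     return validPlacements
--
-- def isNonAttackingPlacements(row,col,blockedColumns,blockedLeftDiagonals,blockedRightDiagonals):
--     if col in blockedColumns:
--         return False
--     if row+col in blockedLeftDiagonals:
--         return False
--     if row-col in blockedRightDiagonals:
--         return False
--
--     return True
--
-- def placeQueen(row,col,blockedColumns,blockedLeftDiagonals,blockedRightDiagonals):
--     blockedColumns.add(col)
--     blockedLeftDiagonals.add(row+col)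
--     blockedRightDiagonals.add(row-col)
--
-- def removeQueen(row,col,blockedColumns,blockedLeftDiagonals,blockedRightDiagonals):
--     blockedColumns.remove(col)
--     blockedLeftDiagonals.remove(row+col)
--     blockedRightDiagonals.remove(row-col)
-- ===== SOURCE B (Python) =====
-- def getNumberOfNonAttackingQueenPlacements(row, blockedColumns, blockedLeftDiagonals, blockedRightDiagonals, boardSize):
--     # Level-by-level (breadth-first) enumeration: keep the list of all partial
--     # placements for the current row as immutable blocked-set triples; the answer
--     # is the number of states that survive to row == boardSize.
--     # (A temporarily mutates the caller's sets but fully restores them before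
--     # returning; B does not touch them at all, so the net effect is identical.)
--     states = [(frozenset(blockedColumns), frozenset(blockedLeftDiagonals), frozenset(blockedRightDiagonals))]
--     r = row
--     while states and r != boardSize:
--         nxt = []
--         for bc, bl, br in states:
--             for col in range(boardSize):
--                 if col not in bc and r + col not in bl and r - col not in br:
--                     nxt.append((bc | {col}, bl | {r + col}, br | {r - col}))
--         states = nxt
--         r += 1
--     return len(states)
-- ===== Notes on version B (the rewrite author's own statement) =====
-- stated objective: alternative
-- what changed: Replaces the depth-first recursion that mutates and restores three shared blocked-sets with an iterative breadth-first sweep that carries the whole frontier of partial placements as a list of immutable set triples and returns its final length (trades memory: the full frontier is held at once).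
import Mathlib
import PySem

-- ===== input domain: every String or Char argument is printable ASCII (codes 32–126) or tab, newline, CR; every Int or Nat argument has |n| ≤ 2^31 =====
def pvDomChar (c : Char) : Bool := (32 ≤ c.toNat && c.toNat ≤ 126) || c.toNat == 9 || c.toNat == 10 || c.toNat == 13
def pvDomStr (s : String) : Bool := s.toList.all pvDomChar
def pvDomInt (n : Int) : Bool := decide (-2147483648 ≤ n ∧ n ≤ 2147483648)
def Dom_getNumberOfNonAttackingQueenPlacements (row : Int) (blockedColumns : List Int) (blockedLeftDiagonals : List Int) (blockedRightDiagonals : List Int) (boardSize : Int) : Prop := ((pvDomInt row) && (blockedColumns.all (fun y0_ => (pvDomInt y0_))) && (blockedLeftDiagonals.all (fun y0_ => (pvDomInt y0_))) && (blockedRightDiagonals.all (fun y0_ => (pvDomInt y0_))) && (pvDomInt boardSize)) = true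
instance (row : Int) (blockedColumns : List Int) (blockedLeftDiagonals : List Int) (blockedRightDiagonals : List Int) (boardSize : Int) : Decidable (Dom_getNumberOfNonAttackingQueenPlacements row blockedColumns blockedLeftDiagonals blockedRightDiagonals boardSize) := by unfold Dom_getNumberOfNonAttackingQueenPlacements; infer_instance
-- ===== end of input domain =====

-- B replaces A's mutate-and-undo depth-first recursion by an iterative breadth-first sweep over a
-- frontier list of immutable blocked-set triples (objective: alternative decomposition, similar time,
-- more memory: the whole frontier is held at once). Side effects: Python A mutates the three caller
-- sets in place but fully restores them before returning normally, B never touches them; the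
-- equivalence proved here is about the return value only.

-- ===== PORT A =====
def isNonAttackingPlacements (row col : Int) (blockedColumns blockedLeftDiagonals blockedRightDiagonals : List Int) : Bool :=
  if PySem.Set.contains blockedColumns col then false
  else if PySem.Set.contains blockedLeftDiagonals (row + col) then false
  else if PySem.Set.contains blockedRightDiagonals (row - col) then false
  else true

def placeQueen (row col : Int) (bc bld brd : List Int) : List Int × List Int × List Int :=
  (PySem.Set.add bc col, PySem.Set.add bld (row + col), PySem.Set.add brd (row - col))

-- set.remove x; in A the removed element was just added by the matching placeQueen, so KeyError is unreachable
def pvSetRemove (s : List Int) (x : Int) : List Int := (PySem.Set.remove? s x).getD s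

def removeQueen (row col : Int) (bc bld brd : List Int) : List Int × List Int × List Int :=
  (pvSetRemove bc col, pvSetRemove bld (row + col), pvSetRemove brd (row - col))

-- termination measure: number of columns of range(boardSize) not yet blocked
def pvFree (bc : List Int) (boardSize : Int) : Nat :=
  ((PySem.List.pyRange 0 boardSize 1).filter (fun c => !PySem.Set.contains bc c)).length

-- the lemmas below are cited by the ports' decreasing_by clauses
lemma pvNotMem (s : List Int) (c : Int) (h : PySem.Set.contains s c = false) : c ∉ s := by
  intro hm
  have := (PySem.Set.contains_iff s c).mpr hm
  rw [h] at this; cases this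

lemma pvNA {row c : Int} {bc bld brd : List Int}
    (hA : isNonAttackingPlacements row c bc bld brd = true) :
    PySem.Set.contains bc c = false ∧ PySem.Set.contains bld (row + c) = false ∧
      PySem.Set.contains brd (row - c) = false := by
  unfold isNonAttackingPlacements at hA
  split_ifs at hA with h1 h2 h3
  exact ⟨Bool.eq_false_iff.mpr h1, Bool.eq_false_iff.mpr h2, Bool.eq_false_iff.mpr h3⟩

lemma pvDiscard_add (s : List Int) (c : Int) (h : c ∉ s) :
    PySem.Set.discard (PySem.Set.add s c) c = s := by
  rw [PySem.Set.add_of_not_mem h]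
  induction s with
  | nil => simp [PySem.Set.discard]
  | cons a t ih =>
      simp only [List.mem_cons, not_or] at h
      have ha : (a == c) = false := beq_eq_false_iff_ne.mpr (fun e => h.1 e.symm)
      simp only [List.cons_append, PySem.Set.discard, List.filter_cons] at *
      simp only [ha]
      simp [ih h.2]

lemma pvSetRemove_add (s : List Int) (c : Int) (h : PySem.Set.contains s c = false) :
    pvSetRemove (PySem.Set.add s c) c = s := by
  have hm : c ∉ s := pvNotMem s c h
  have hmem : c ∈ PySem.Set.add s c := by rw [PySem.Set.add_of_not_mem hm]; simp
  rw [pvSetRemove, PySem.Set.remove?_of_mem hmem, Option.getD_some, pvDiscard_add s c hm]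

lemma pvRestore {row c : Int} {bc bld brd : List Int}
    (hA : isNonAttackingPlacements row c bc bld brd = true) :
    removeQueen row c (placeQueen row c bc bld brd).1 (placeQueen row c bc bld brd).2.1
      (placeQueen row c bc bld brd).2.2 = (bc, bld, brd) := by
  obtain ⟨h1, h2, h3⟩ := pvNA hA
  simp only [placeQueen, removeQueen]
  rw [pvSetRemove_add _ _ h1, pvSetRemove_add _ _ h2, pvSetRemove_add _ _ h3]

lemma pvFilter_lt {L : List Int} {q : Int → Bool} {c : Int} (hc : c ∈ L) (hq : q c = false) :
    (L.filter q).length < L.length := by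
  simp only [List.length_filter_lt_length_iff_exists]
  exact ⟨c, hc, by simp [hq]⟩

lemma pvFree_add_lt (bc : List Int) (c boardSize : Int)
    (hc : c ∈ PySem.List.pyRange 0 boardSize 1) (h : PySem.Set.contains bc c = false) :
    pvFree (PySem.Set.add bc c) boardSize < pvFree bc boardSize := by
  have hm : c ∉ bc := pvNotMem bc c h
  rw [pvFree, pvFree, PySem.Set.add_of_not_mem hm]
  have hsub : ∀ x ∈ PySem.List.pyRange 0 boardSize 1, (!PySem.Set.contains (bc ++ [c]) x) =
      ((!(x == c)) && !PySem.Set.contains bc x) := by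
    intro x _
    by_cases hx : x = c
    · subst hx; simp [hm]
    · by_cases hxb : x ∈ bc <;> simp [hx, hxb]
  rw [List.filter_congr hsub, ← List.filter_filter]
  have hcmem : c ∈ (PySem.List.pyRange 0 boardSize 1).filter (fun x => !PySem.Set.contains bc x) := by
    simp [List.mem_filter, hc, hm]
  exact pvFilter_lt hcmem (by simp)

mutual
def getNumberOfNonAttackingQueenPlacements (row : Int) (blockedColumns : List Int) (blockedLeftDiagonals : List Int) (blockedRightDiagonals : List Int) (boardSize : Int) : Int :=
  if row == boardSize then 1
  else
    (pvLoopA row (PySem.List.pyRange 0 boardSize 1) blockedColumns blockedLeftDiagonals blockedRightDiagonals boardSize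
        (fun _ hc => hc)).1
termination_by (pvFree blockedColumns boardSize, boardSize.toNat + 1)
decreasing_by
  apply Prod.Lex.right
  rw [PySem.List.length_pyRange_one]
  omega

-- the 'for col in range(boardSize)' loop of A: threads the mutated sets and the running count
def pvLoopA (row : Int) (cols : List Int) (bc bld brd : List Int) (boardSize : Int)
    (h : ∀ c ∈ cols, c ∈ PySem.List.pyRange 0 boardSize 1) : Int × List Int × List Int × List Int :=
  match cols with
  | [] => (0, bc, bld, brd)
  | c :: rest =>
    if hA : isNonAttackingPlacements row c bc bld brd then
      let s := placeQueen row c bc bld brd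
      let v := getNumberOfNonAttackingQueenPlacements (row + 1) s.1 s.2.1 s.2.2 boardSize
      let s' := removeQueen row c s.1 s.2.1 s.2.2
      let r := pvLoopA row rest s'.1 s'.2.1 s'.2.2 boardSize (fun x hx => h x (List.mem_cons_of_mem _ hx))
      (v + r.1, r.2)
    else
      pvLoopA row rest bc bld brd boardSize (fun x hx => h x (List.mem_cons_of_mem _ hx))
termination_by (pvFree bc boardSize, cols.length)
decreasing_by
  · apply Prod.Lex.left
    simp only [placeQueen]
    exact pvFree_add_lt _ _ _ (h c List.mem_cons_self) (pvNA hA).1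
  · have hr := pvRestore hA
    simp only [removeQueen, placeQueen] at hr ⊢
    rw [Prod.mk.injEq] at hr
    rw [hr.1]
    apply Prod.Lex.right
    simp
  · apply Prod.Lex.right
    simp
end

-- ===== PORT B =====
-- one frontier state of B: (blockedColumns, blockedLeftDiagonals, blockedRightDiagonals)
def pvOkB (r c : Int) (s : List Int × List Int × List Int) : Bool :=
  !PySem.Set.contains s.1 c && (!PySem.Set.contains s.2.1 (r + c) && !PySem.Set.contains s.2.2 (r - c))

-- (bc | {col}, bl | {r+col}, br | {r-col})
def pvChild (r c : Int) (s : List Int × List Int × List Int) : List Int × List Int × List Int :=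
  (PySem.Set.union s.1 [c], PySem.Set.union s.2.1 [r + c], PySem.Set.union s.2.2 [r - c])

-- the nested 'for bc, bl, br in states: for col in range(boardSize):' loops building nxt
def pvStepB (r n : Int) (states : List (List Int × List Int × List Int)) : List (List Int × List Int × List Int) :=
  states.foldl (fun nxt s =>
    (PySem.List.pyRange 0 n 1).foldl (fun nxt2 c =>
      if pvOkB r c s then nxt2 ++ [pvChild r c s] else nxt2) nxt) []

-- termination measure for the while loop: 1 + the largest number of still-free columns over the frontier
def pvM (states : List (List Int × List Int × List Int)) (n : Int) : Nat :=
  states.foldr (fun s m => max (pvFree s.1 n + 1) m) 0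

-- the lemmas below are cited by pvBfs's decreasing_by clause
lemma pvUnion_singleton (s : List Int) (c : Int) : PySem.Set.union s [c] = PySem.Set.add s c := by
  simp [PySem.Set.union, PySem.Set.update]

lemma pvStepB_eq (r n : Int) (states : List (List Int × List Int × List Int)) :
    pvStepB r n states = states.flatMap (fun s =>
      ((PySem.List.pyRange 0 n 1).filter (fun c => pvOkB r c s)).map (fun c => pvChild r c s)) := by
  rw [pvStepB]
  have hinner : ∀ (s : List Int × List Int × List Int) (acc : List (List Int × List Int × List Int)),
      (PySem.List.pyRange 0 n 1).foldl (fun nxt2 c =>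
        if pvOkB r c s then nxt2 ++ [pvChild r c s] else nxt2) acc =
      acc ++ ((PySem.List.pyRange 0 n 1).filter (fun c => pvOkB r c s)).map (fun c => pvChild r c s) :=
    fun s acc => PySem.List.foldl_append_if _ _ _ _
  simp only [hinner]
  rw [PySem.List.foldl_append_eq_flatMap]
  simp

lemma pvOkB_cols {r c : Int} {s : List Int × List Int × List Int} (hok : pvOkB r c s = true) :
    PySem.Set.contains s.1 c = false := by
  by_cases h : PySem.Set.contains s.1 c = true
  · unfold pvOkB at hok
    rw [h] at hok
    simp at hok
  · exact Bool.eq_false_iff.mpr h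

lemma pvMem_step_lt {r n : Int} {states s' : _} (hc' : s' ∈ pvStepB r n states) :
    ∃ s ∈ states, pvFree s'.1 n < pvFree s.1 n := by
  rw [pvStepB_eq] at hc'
  simp only [List.mem_flatMap, List.mem_map, List.mem_filter] at hc'
  obtain ⟨s, hs, c, ⟨hcr, hok⟩, rfl⟩ := hc'
  refine ⟨s, hs, ?_⟩
  show pvFree (pvChild r c s).1 n < pvFree s.1 n
  rw [pvChild, pvUnion_singleton]
  exact pvFree_add_lt _ _ _ hcr (pvOkB_cols hok)

lemma pvM_mem_le {states : List (List Int × List Int × List Int)} {s : _} {n : Int}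
    (hs : s ∈ states) : pvFree s.1 n + 1 ≤ pvM states n := by
  induction states with
  | nil => cases hs
  | cons a t ih =>
      rcases List.mem_cons.mp hs with rfl | hm
      · exact le_max_left _ _
      · exact le_trans (ih hm) (le_max_right _ _)

lemma pvM_le {states : List (List Int × List Int × List Int)} {n : Int} {k : Nat}
    (h : ∀ s ∈ states, pvFree s.1 n + 1 ≤ k) : pvM states n ≤ k := by
  induction states with
  | nil => exact Nat.zero_le _
  | cons a t ih =>
      exact max_le (h a List.mem_cons_self) (ih fun s hs => h s (List.mem_cons_of_mem _ hs))

lemma pvM_lt_of_step {r n : Int} {states : List (List Int × List Int × List Int)}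
    (hne : states ≠ []) : pvM (pvStepB r n states) n < pvM states n := by
  obtain ⟨a, t, rfl⟩ := List.exists_cons_of_ne_nil hne
  have h1 : 1 ≤ pvM (a :: t) n := le_trans (by omega) (pvM_mem_le List.mem_cons_self)
  have h2 : pvM (pvStepB r n (a :: t)) n ≤ pvM (a :: t) n - 1 := by
    apply pvM_le
    intro s' hs'
    obtain ⟨s, hs, hlt⟩ := pvMem_step_lt hs'
    have := pvM_mem_le (n := n) hs
    omega
  omega

-- the 'while states and r != boardSize:' loop of B
def pvBfs (r : Int) (states : List (List Int × List Int × List Int)) (n : Int) : Int :=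
  if h : states.isEmpty ∨ r == n then (states.length : Int)
  else pvBfs (r + 1) (pvStepB r n states) n
termination_by pvM states n
decreasing_by
  apply pvM_lt_of_step
  intro he
  exact h (Or.inl (by simp [he]))

def getNumberOfNonAttackingQueenPlacements_alt (row : Int) (blockedColumns : List Int) (blockedLeftDiagonals : List Int) (blockedRightDiagonals : List Int) (boardSize : Int) : Int :=
  pvBfs row [(blockedColumns, blockedLeftDiagonals, blockedRightDiagonals)] boardSize

-- ===== PRECONDITION & SPEC =====
def Spec_getNumberOfNonAttackingQueenPlacements (row : Int) (blockedColumns : List Int) (blockedLeftDiagonals : List Int) (blockedRightDiagonals : List Int) (boardSize : Int) (out : Int) : Prop := out = getNumberOfNonAttackingQueenPlacements_alt row blockedColumns blockedLeftDiagonals blockedRightDiagonals boardSize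
instance (row : Int) (blockedColumns : List Int) (blockedLeftDiagonals : List Int) (blockedRightDiagonals : List Int) (boardSize : Int) (out : Int) : Decidable (Spec_getNumberOfNonAttackingQueenPlacements row blockedColumns blockedLeftDiagonals blockedRightDiagonals boardSize out) := by unfold Spec_getNumberOfNonAttackingQueenPlacements; infer_instance

-- ===== CLAIM (what is proved, stated in full; the proofs are below) =====
def Claim_equal_getNumberOfNonAttackingQueenPlacements : Prop := ∀ (row : Int) (blockedColumns : List Int) (blockedLeftDiagonals : List Int) (blockedRightDiagonals : List Int) (boardSize : Int), Dom_getNumberOfNonAttackingQueenPlacements row blockedColumns blockedLeftDiagonals blockedRightDiagonals boardSize → Spec_getNumberOfNonAttackingQueenPlacements row blockedColumns blockedLeftDiagonals blockedRightDiagonals boardSize (getNumberOfNonAttackingQueenPlacements row blockedColumns blockedLeftDiagonals blockedRightDiagonals boardSize)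

-- ===== LEMMAS AND PROOFS =====

-- A's placement test and B's are the same three membership checks
lemma pvNA_eq_ok (row c : Int) (s : List Int × List Int × List Int) :
    isNonAttackingPlacements row c s.1 s.2.1 s.2.2 = pvOkB row c s := by
  unfold isNonAttackingPlacements pvOkB
  by_cases h1 : PySem.Set.contains s.1 c = true <;>
    by_cases h2 : PySem.Set.contains s.2.1 (row + c) = true <;>
      by_cases h3 : PySem.Set.contains s.2.2 (row - c) = true <;>
        simp_all

-- A's column loop restores the sets and returns the sum of the recursive counts
lemma pvLoopA_eq (row n : Int) (cols : List Int) :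
    ∀ (h : ∀ c ∈ cols, c ∈ PySem.List.pyRange 0 n 1) (bc bld brd : List Int),
    pvLoopA row cols bc bld brd n h =
      (((cols.filter (fun c => isNonAttackingPlacements row c bc bld brd)).map
        (fun c => getNumberOfNonAttackingQueenPlacements (row + 1) (PySem.Set.add bc c)
          (PySem.Set.add bld (row + c)) (PySem.Set.add brd (row - c)) n)).sum, bc, bld, brd) := by
  induction cols with
  | nil => intro h bc bld brd; simp [pvLoopA]
  | cons c rest ih =>
      intro h bc bld brd
      rw [pvLoopA]
      by_cases hA : isNonAttackingPlacements row c bc bld brd = true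
      · have hr := pvRestore hA
        simp only [hA, dite_true]
        simp only [removeQueen, placeQueen] at hr ⊢
        simp only [Prod.mk.injEq] at hr
        rw [hr.1, hr.2.1, hr.2.2, ih _ bc bld brd]
        simp [hA]
      · simp only [hA, reduceDIte, Bool.false_eq_true]
        rw [ih _ bc bld brd]
        simp [hA]

-- one unfolding of A, phrased over B's per-state expansion
lemma pvA_eq_sum (row n : Int) (s : List Int × List Int × List Int) (h : ¬ row = n) :
    getNumberOfNonAttackingQueenPlacements row s.1 s.2.1 s.2.2 n =
      ((((PySem.List.pyRange 0 n 1).filter (fun c => pvOkB row c s)).map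
        (fun c => pvChild row c s)).map
        (fun t => getNumberOfNonAttackingQueenPlacements (row + 1) t.1 t.2.1 t.2.2 n)).sum := by
  rw [getNumberOfNonAttackingQueenPlacements]
  simp only [beq_iff_eq, h, if_false]
  rw [pvLoopA_eq]
  simp only [List.map_map]
  congr 1
  have hp : ∀ c ∈ PySem.List.pyRange 0 n 1,
      isNonAttackingPlacements row c s.1 s.2.1 s.2.2 = pvOkB row c s :=
    fun c _ => pvNA_eq_ok row c s
  rw [List.filter_congr hp]
  apply List.map_congr_left
  intro c _
  simp [pvChild, pvUnion_singleton]

-- B's frontier sweep computes the sum of A over the frontier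
lemma pvBfs_sum (n : Int) (m : Nat) :
    ∀ (states : List (List Int × List Int × List Int)) (r : Int), pvM states n ≤ m →
    pvBfs r states n =
      (states.map (fun s => getNumberOfNonAttackingQueenPlacements r s.1 s.2.1 s.2.2 n)).sum := by
  induction m with
  | zero =>
      intro states r hm
      have : states = [] := by
        cases states with
        | nil => rfl
        | cons a t =>
            have := pvM_mem_le (n := n) (List.mem_cons_self (a := a) (l := t))
            omega
      subst this
      rw [pvBfs]
      simp
  | succ m ih =>
      intro states r hm
      rw [pvBfs]
      by_cases hcond : states.isEmpty = true ∨ (r == n) = true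
      · rw [dif_pos hcond]
        rcases hcond with he | hrn
        · simp [List.isEmpty_iff.mp he]
        · have hr : r = n := by simpa using hrn
          have hone : ∀ s ∈ states,
              getNumberOfNonAttackingQueenPlacements r s.1 s.2.1 s.2.2 n = 1 := by
            intro s _
            rw [getNumberOfNonAttackingQueenPlacements]
            simp [hr]
          rw [List.map_congr_left hone, PySem.List.sum_map_const_int]
          simp
      · rw [dif_neg hcond]
        rw [not_or] at hcond
        have hne : states ≠ [] := by
          intro he
          exact absurd (by simp [he] : states.isEmpty = true) (by simpa using hcond.1)
        have hrn : ¬ r = n := by simpa using hcond.2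
        have hstep : pvM (pvStepB r n states) n ≤ m := by
          have := pvM_lt_of_step (r := r) (n := n) hne
          omega
        rw [ih _ _ hstep, pvStepB_eq, List.map_flatMap, List.flatMap_def, List.sum_flatten,
          List.map_map]
        apply congrArg List.sum
        apply List.map_congr_left
        intro s _
        exact (pvA_eq_sum r n s hrn).symm

-- ===== VERDICT (by name: the statement is the Claim_ definition above) =====
theorem getNumberOfNonAttackingQueenPlacements_spec : Claim_equal_getNumberOfNonAttackingQueenPlacements := by
  intro row bc bld brd n _
  unfold Spec_getNumberOfNonAttackingQueenPlacements getNumberOfNonAttackingQueenPlacements_alt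
  rw [pvBfs_sum n (pvM [(bc, bld, brd)] n) _ _ (le_refl _)]
  simp
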